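-- pv_equiv track=rewrite | github.com/Markyriott/collegestuff | codePath/Unit3/Session1/AdvancedA/p1.py | arrange_guest_arrival_order
-- ===== SOURCE A (Python) =====
-- def arrange_guest_arrival_order(arrival_pattern):
--     stack = []
--     result = [''] * (len(arrival_pattern) + 1)
--     count = 1
--
--     for i in range(len(arrival_pattern)):
--         stack.append(i)
--         if arrival_pattern[i] == "I":
--             while stack:
--                 temp = stack.pop()
--                 result[temp] = str(count)
--                 count+= 1
--
--     stack.append(len(arrival_pattern))
--
--     while stack:
--         temp = stack.pop()
--         result[temp] = str(count)
--         count+= 1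
--
--     return result
-- ===== SOURCE B (Python) =====
-- def arrange_guest_arrival_order(arrival_pattern):
--     n = len(arrival_pattern)
--     result = [str(i) for i in range(1, n + 2)]
--     i = 0
--     while i < n:
--         if arrival_pattern[i] == 'I':
--             i += 1
--         else:
--             j = i
--             while j < n and arrival_pattern[j] != 'I':
--                 j += 1
--             result[i:j + 1] = result[i:j + 1][::-1]
--             i = j
--     return result
-- ===== Notes on version B (the rewrite author's own statement) =====
-- stated objective: alternative
-- what changed: Replaces A's deferred stack-flush numbering with building the identity arrangement [1..n+1] and reversing, in place via slice assignment, the segment covered by each maximal run of non-'I' characters.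
import Mathlib
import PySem

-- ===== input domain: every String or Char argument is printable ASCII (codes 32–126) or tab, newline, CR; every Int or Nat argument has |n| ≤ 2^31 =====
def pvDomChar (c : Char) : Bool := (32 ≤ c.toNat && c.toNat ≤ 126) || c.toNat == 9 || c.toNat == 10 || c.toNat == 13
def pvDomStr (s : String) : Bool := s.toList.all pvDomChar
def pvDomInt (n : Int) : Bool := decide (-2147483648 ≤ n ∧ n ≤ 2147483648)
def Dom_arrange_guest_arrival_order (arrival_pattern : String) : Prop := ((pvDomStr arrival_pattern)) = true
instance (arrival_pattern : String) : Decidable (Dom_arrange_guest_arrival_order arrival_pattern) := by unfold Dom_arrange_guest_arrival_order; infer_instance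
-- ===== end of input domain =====

-- B replaces A's deferred stack-flush numbering by building the identity arrangement and
-- reversing the segment under each maximal run of non-'I' characters (objective: alternative).

-- ===== PORT A =====
-- the 'while stack:' flush loop: pop, write str(count) at the popped index, count += 1
-- (every popped index is non-negative and in range, so .toNat is exact here)
def pvFlushA : List Int → List String → Int → List String × Int
  | [], res, c => (res, c)
  | t :: st, res, c => pvFlushA st (res.set t.toNat (PySem.Int.toStr c)) (c + 1)

-- the 'for i in range(len(arrival_pattern))' loop, as structural recursion over the chars,
-- carrying the index i and the state (stack, result, count); the flush on 'I' empties the stack.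
def pvLoopA : List Char → Int → List Int → List String → Int → List Int × List String × Int
  | [], _, st, res, c => (st, res, c)
  | ch :: rest, i, st, res, c =>
    let st' := i :: st
    if ch = 'I' then
      let p := pvFlushA st' res c
      pvLoopA rest (i + 1) [] p.1 p.2
    else
      pvLoopA rest (i + 1) st' res c

def arrange_guest_arrival_order (arrival_pattern : String) : List String :=
  let l := arrival_pattern.toList
  let r := pvLoopA l 0 [] (List.replicate (l.length + 1) "") 1
  (pvFlushA ((l.length : Int) :: r.1) r.2.1 r.2.2).1

-- ===== PORT B =====
-- result[i:j+1] = result[i:j+1][::-1]  (i and j are always non-negative and in range here)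
def pvRevSlice (res : List String) (i j : Nat) : List String :=
  res.take i ++ ((res.drop i).take (j + 1 - i)).reverse ++ res.drop (j + 1)

-- B's outer while loop: skip an 'I'; otherwise the inner while scans to the end of the run of
-- non-'I' characters (k more after the current one) and the covered slice is reversed,
-- continuing at the first position after the run.
def pvLoopB : List Char → Nat → List String → List String
  | [], _, res => res
  | ch :: rest, i, res =>
    if ch = 'I' then pvLoopB rest (i + 1) res
    else
      let k := (rest.takeWhile (fun c => c ≠ 'I')).length
      pvLoopB (rest.drop k) (i + k + 1) (pvRevSlice res i (i + k + 1))
termination_by l => l.length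
decreasing_by
  all_goals simp

def arrange_guest_arrival_order_alt (arrival_pattern : String) : List String :=
  let l := arrival_pattern.toList
  -- [str(i) for i in range(1, n + 2)]
  let result := (PySem.List.pyRange 1 ((l.length : Int) + 2) 1).map PySem.Int.toStr
  pvLoopB l 0 result

-- ===== PRECONDITION & SPEC =====
def Spec_arrange_guest_arrival_order (arrival_pattern : String) (out : List String) : Prop := out = arrange_guest_arrival_order_alt arrival_pattern
instance (arrival_pattern : String) (out : List String) : Decidable (Spec_arrange_guest_arrival_order arrival_pattern out) := by unfold Spec_arrange_guest_arrival_order; infer_instance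

-- ===== CLAIM (what is proved, stated in full; the proofs are below) =====
def Claim_equal_arrange_guest_arrival_order : Prop := ∀ (arrival_pattern : String), Dom_arrange_guest_arrival_order arrival_pattern → Spec_arrange_guest_arrival_order arrival_pattern (arrange_guest_arrival_order arrival_pattern)

-- ===== LEMMAS AND PROOFS =====

-- the descending stack [i+m-1, …, i+1, i] of m consecutive indices (top first)
def pvDesc (i : Int) : Nat → List Int
  | 0 => []
  | m + 1 => (i + (m : Int)) :: pvDesc i m

-- the m strings [str(c), str(c+1), …, str(c+m-1)]
def pvAsc (c : Int) : Nat → List String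
  | 0 => []
  | m + 1 => PySem.Int.toStr c :: pvAsc (c + 1) m

-- A's main loop followed by the final push-and-flush, as one expression
def pvAfterA (l : List Char) (i : Int) (res : List String) (c : Int) (nfin : Int) : List String :=
  (pvFlushA (nfin :: (pvLoopA l i [] res c).1) (pvLoopA l i [] res c).2.1 (pvLoopA l i [] res c).2.2).1

lemma pvAsc_length (c : Int) (m : Nat) : (pvAsc c m).length = m := by
  induction m generalizing c with
  | zero => simp [pvAsc]
  | succ m ih => simp [pvAsc, ih]

lemma pvAsc_append (m m' : Nat) (c : Int) :
    pvAsc c (m + m') = pvAsc c m ++ pvAsc (c + (m : Int)) m' := by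
  induction m generalizing c with
  | zero => simp [pvAsc]
  | succ m ih =>
    rw [show c + ((m + 1 : Nat) : Int) = (c + 1) + (m : Int) by push_cast; ring]
    rw [show m + 1 + m' = (m + m') + 1 by omega]
    simp only [pvAsc, List.cons_append]
    rw [ih (c + 1)]

lemma pvDesc_snoc (m : Nat) (i : Int) : pvDesc (i + 1) m ++ [i] = pvDesc i (m + 1) := by
  induction m with
  | zero => simp [pvDesc]
  | succ m ih =>
    simp only [pvDesc, List.cons_append, ih]
    rw [show i + 1 + (m : Int) = i + ((m + 1 : Nat) : Int) by omega]

lemma pvDropAppend {α : Type} (l₁ l₂ : List α) (n : Nat) :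
    (l₁ ++ l₂).drop (l₁.length + n) = l₂.drop n := by
  induction l₁ with
  | nil => simp
  | cons a l ih =>
    rw [show (a :: l).length + n = (l.length + n) + 1 by simp; omega]
    simp [ih]

lemma pvDropSet {α : Type} (l : List α) (n : Nat) (v : α) (h : n < l.length) :
    (l.set n v).drop n = v :: l.drop (n + 1) := by
  rw [List.drop_set, if_neg (lt_irrefl n), Nat.sub_self,
    List.drop_eq_getElem_cons h, List.set_cons_zero]

lemma pvLoopA_run (d : List Char) (hd : ∀ ch ∈ d, ch ≠ 'I') :
    ∀ (rest : List Char) (i : Int) (st : List Int) (res : List String) (c : Int),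
    pvLoopA (d ++ rest) i st res c
      = pvLoopA rest (i + (d.length : Int)) (pvDesc i d.length ++ st) res c := by
  induction d with
  | nil => intro rest i st res c; simp [pvDesc]
  | cons ch d' ih =>
    intro rest i st res c
    have hch : ch ≠ 'I' := hd ch (by simp)
    have hd' : ∀ x ∈ d', x ≠ 'I' := fun x hx => hd x (by simp [hx])
    simp only [List.cons_append, pvLoopA, if_neg hch]
    rw [ih hd']
    have h2 : pvDesc (i + 1) d'.length ++ (i :: st) = pvDesc i ((ch :: d').length) ++ st := by
      rw [show (i :: st) = [i] ++ st from rfl, ← List.append_assoc, pvDesc_snoc]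
      rfl
    rw [h2, show i + 1 + (d'.length : Int) = i + (((ch :: d').length : Nat) : Int) by
      simp [List.length_cons]; ring]

lemma pvFlushA_desc (m : Nat) :
    ∀ (pre rest : List String) (c : Int), m ≤ rest.length →
    pvFlushA (pvDesc (pre.length : Int) m) (pre ++ rest) c
      = (pre ++ (pvAsc c m).reverse ++ rest.drop m, c + (m : Int)) := by
  induction m with
  | zero => intro pre rest c _; simp [pvDesc, pvFlushA, pvAsc]
  | succ m ih =>
    intro pre rest c hm
    have hmr : m < rest.length := by omega
    simp only [pvDesc, pvFlushA]
    rw [show ((pre.length : Int) + (m : Int)).toNat = pre.length + m by omega]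
    rw [List.set_append_right _ _ (Nat.le_add_right _ _),
      show pre.length + m - pre.length = m by omega]
    rw [ih pre (rest.set m (PySem.Int.toStr c)) (c + 1) (by simp; omega)]
    rw [pvDropSet rest m _ hmr]
    rw [show (pvAsc c (m + 1)).reverse = (pvAsc (c + 1) m).reverse ++ [PySem.Int.toStr c] by
      simp [pvAsc]]
    rw [show c + 1 + (m : Int) = c + ((m + 1 : Nat) : Int) by push_cast; ring]
    simp [List.append_assoc]

lemma pvRange_map (m : Nat) : ∀ (c : Int),
    (PySem.List.pyRange c (c + (m : Int)) 1).map PySem.Int.toStr = pvAsc c m := by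
  induction m with
  | zero => intro c; rw [PySem.List.pyRange_one_eq_nil (by omega)]; simp [pvAsc]
  | succ m ih =>
    intro c
    rw [PySem.List.pyRange_one_cons (by omega)]
    simp only [List.map_cons, pvAsc]
    rw [show c + ((m + 1 : Nat) : Int) = (c + 1) + (m : Int) by push_cast; ring]
    rw [ih (c + 1)]

-- reductions of the ports' loops, used by the main induction
lemma pvLoopA_consI (rest : List Char) (i : Int) (res : List String) (c : Int) :
    pvLoopA ('I' :: rest) i [] res c
      = pvLoopA rest (i + 1) [] (res.set i.toNat (PySem.Int.toStr c)) (c + 1) := by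
  simp [pvLoopA, pvFlushA]

lemma pvLoopA_I (rest : List Char) (i : Int) (st : List Int) (res : List String) (c : Int) :
    pvLoopA ('I' :: rest) i st res c
      = pvLoopA rest (i + 1) [] (pvFlushA (i :: st) res c).1 (pvFlushA (i :: st) res c).2 := by
  simp [pvLoopA]

lemma pvLoopB_I (rest : List Char) (i : Nat) (res : List String) :
    pvLoopB ('I' :: rest) i res = pvLoopB rest (i + 1) res := by
  simp [pvLoopB]

lemma pvLoopB_D (ch : Char) (rest : List Char) (i : Nat) (res : List String) (h : ch ≠ 'I') :
    pvLoopB (ch :: rest) i res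
      = pvLoopB (rest.drop (rest.takeWhile (fun x => x ≠ 'I')).length)
          (i + (rest.takeWhile (fun x => x ≠ 'I')).length + 1)
          (pvRevSlice res i (i + (rest.takeWhile (fun x => x ≠ 'I')).length + 1)) := by
  rw [pvLoopB]
  simp [h]

lemma pvDropWhileHead {α : Type} (p : α → Bool) :
    ∀ (l : List α) (a : α) (r : List α), l.dropWhile p = a :: r → p a = false := by
  intro l
  induction l with
  | nil => intro a r h; simp [List.dropWhile] at h
  | cons x xs ih =>
    intro a r h
    by_cases hx : p x
    · rw [List.dropWhile_cons_of_pos hx] at h; exact ih a r h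
    · rw [List.dropWhile_cons_of_neg hx] at h
      injection h with h1 _
      subst h1
      simpa using hx

-- base case: the empty remaining pattern (one final cell left)
lemma pvMainNil (pre : List String) (t0 : String) :
    pvAfterA [] (pre.length : Int) (pre ++ [t0]) ((pre.length : Int) + 1)
        ((pre.length + ([] : List Char).length : Nat) : Int)
      = pvLoopB [] pre.length (pre ++ pvAsc ((pre.length : Int) + 1) 1) := by
  simp only [pvAfterA, pvLoopA, pvLoopB, pvFlushA, pvAsc, List.length_nil, Nat.add_zero]
  rw [show ((pre.length : Nat) : Int).toNat = pre.length by omega]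
  rw [List.set_append_right _ _ (le_refl _), Nat.sub_self, List.set_cons_zero]

lemma pvMain (N : Nat) : ∀ (l : List Char) (pre tl : List String),
    l.length ≤ N → tl.length = l.length + 1 →
    pvAfterA l (pre.length : Int) (pre ++ tl) ((pre.length : Int) + 1)
        ((pre.length + l.length : Nat) : Int)
      = pvLoopB l pre.length (pre ++ pvAsc ((pre.length : Int) + 1) (l.length + 1)) := by
  induction N with
  | zero =>
    intro l pre tl hN htl
    have hl : l = [] := List.eq_nil_of_length_eq_zero (by omega)
    subst hl
    rcases tl with _ | ⟨t0, _ | ⟨t1, tl2⟩⟩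
    · simp at htl
    · exact pvMainNil pre t0
    · simp at htl
  | succ N IH =>
    intro l pre tl hN htl
    cases l with
    | nil =>
      rcases tl with _ | ⟨t0, _ | ⟨t1, tl2⟩⟩
      · simp at htl
      · exact pvMainNil pre t0
      · simp at htl
    | cons ch rest =>
      by_cases hch : ch = 'I'
      · -- an 'I' at the current position: A flushes the singleton stack, B keeps the cell
        subst hch
        obtain ⟨t0, tl', rfl⟩ : ∃ t0 tl', tl = t0 :: tl' := by
          cases tl with
          | nil => simp at htl
          | cons a b => exact ⟨a, b, rfl⟩
        have htl' : tl'.length = rest.length + 1 := by simp at htl; omega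
        set c : Int := (pre.length : Int) + 1 with hc
        have hstep : pvAfterA ('I' :: rest) (pre.length : Int) (pre ++ t0 :: tl') c
              ((pre.length + ('I' :: rest).length : Nat) : Int)
            = pvAfterA rest ((pre ++ [PySem.Int.toStr c]).length : Int)
              ((pre ++ [PySem.Int.toStr c]) ++ tl')
              (((pre ++ [PySem.Int.toStr c]).length : Int) + 1)
              (((pre ++ [PySem.Int.toStr c]).length + rest.length : Nat) : Int) := by
          simp only [pvAfterA]
          rw [pvLoopA_consI]
          rw [show ((pre.length : Nat) : Int).toNat = pre.length by omega]
          rw [List.set_append_right _ _ (le_refl _), Nat.sub_self, List.set_cons_zero]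
          rw [show (pre ++ PySem.Int.toStr c :: tl') = (pre ++ [PySem.Int.toStr c]) ++ tl' by simp]
          rw [show (pre.length : Int) + 1 = (((pre ++ [PySem.Int.toStr c]).length : Nat) : Int) by
            simp]
          rw [show c + 1 = (((pre ++ [PySem.Int.toStr c]).length : Nat) : Int) + 1 by simp [hc]]
          rw [show ((pre.length + ('I' :: rest).length : Nat) : Int)
              = (((pre ++ [PySem.Int.toStr c]).length + rest.length : Nat) : Int) by simp; omega]
        rw [hstep, IH rest (pre ++ [PySem.Int.toStr c]) tl' (by simp at hN; omega) htl']
        rw [pvLoopB_I]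
        rw [show (pre ++ [PySem.Int.toStr c]).length = pre.length + 1 by simp]
        rw [show ('I' :: rest).length + 1 = (rest.length + 1) + 1 by simp]
        rw [show pvAsc c ((rest.length + 1) + 1)
            = PySem.Int.toStr c :: pvAsc (c + 1) (rest.length + 1) from rfl]
        rw [show ((pre.length + 1 : Nat) : Int) + 1 = c + 1 by rw [hc]; push_cast; ring]
        simp [List.append_assoc]
      · -- a run of non-'I' characters: A accumulates then flushes, B reverses the slice
        set tw := rest.takeWhile (fun x => x ≠ 'I') with htw
        set dw := rest.dropWhile (fun x => x ≠ 'I') with hdw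
        set k := tw.length with hk
        have hsplit : rest = tw ++ dw := (List.takeWhile_append_dropWhile).symm
        have hdnonI : ∀ x ∈ ch :: tw, x ≠ 'I' := by
          intro x hx
          rcases List.mem_cons.mp hx with h | h
          · exact h ▸ hch
          · have := List.mem_takeWhile_imp h
            simpa using this
        have hl : ch :: rest = (ch :: tw) ++ dw := by rw [hsplit]; rfl
        have hrest : rest.drop k = dw := by
          conv_lhs => rw [hsplit]
          exact List.drop_left' rfl
        have hrun : pvLoopA (ch :: rest) (pre.length : Int) [] (pre ++ tl)
              ((pre.length : Int) + 1)
            = pvLoopA dw ((pre.length : Int) + ((k + 1 : Nat) : Int))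
              (pvDesc (pre.length : Int) (k + 1)) (pre ++ tl) ((pre.length : Int) + 1) := by
          conv_lhs => rw [hl]
          rw [pvLoopA_run (ch :: tw) hdnonI]
          rw [show ((ch :: tw).length : Nat) = k + 1 by simp [hk]]
          rw [List.append_nil]
        rcases hdw' : dw with _ | ⟨c1, rest''⟩
        · -- the pattern ends with this run
          have hrk : rest.length = k := by
            have := congrArg List.length hsplit
            simp [hdw'] at this
            omega
          simp only [pvAfterA]
          rw [hrun, hdw']
          simp only [pvLoopA]
          rw [show ((pre.length + (ch :: rest).length : Nat) : Int)
              = (pre.length : Int) + ((k + 1 : Nat) : Int) by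
            simp only [List.length_cons, hrk]; omega]
          rw [show ((pre.length : Int) + ((k + 1 : Nat) : Int)) :: pvDesc (pre.length : Int) (k + 1)
              = pvDesc (pre.length : Int) (k + 2) from rfl]
          rw [pvFlushA_desc (k + 2) pre tl _ (by simp at htl; omega)]
          rw [show tl.drop (k + 2) = [] from
            List.drop_eq_nil_of_le (by simp at htl; omega)]
          -- now the B side
          rw [pvLoopB_D ch rest pre.length _ hch]
          rw [← htw, ← hk, hrest, hdw']
          simp only [pvLoopB]
          rw [show (ch :: rest).length + 1 = k + 2 by simp [hrk]]
          simp only [pvRevSlice]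
          rw [List.take_left' rfl, List.drop_left' rfl]
          rw [show pre.length + k + 1 + 1 - pre.length = k + 2 by omega]
          rw [List.take_of_length_le (by rw [pvAsc_length])]
          rw [show pre.length + k + 1 + 1 = pre.length + (k + 2) by omega, pvDropAppend]
          rw [show (pvAsc ((pre.length : Int) + 1) (k + 2)).drop (k + 2) = [] from
            List.drop_eq_nil_of_le (by rw [pvAsc_length])]
        · -- the run is followed by an 'I' (and possibly more pattern)
          have hc1 : c1 = 'I' := by
            have h := pvDropWhileHead (fun x => decide (x ≠ 'I')) rest c1 rest'' (by
              rw [← hdw]; exact hdw')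
            simpa using h
          subst hc1
          have hrk : rest.length = k + 1 + rest''.length := by
            have := congrArg List.length hsplit
            simp [hdw'] at this
            omega
          set c : Int := (pre.length : Int) + 1 with hc
          set pre₂ : List String := pre ++ (pvAsc c (k + 2)).reverse with hpre₂
          have hlen₂ : pre₂.length = pre.length + (k + 2) := by
            simp [hpre₂, pvAsc_length]
          have htl₂ : (tl.drop (k + 2)).length = rest''.length + 1 := by
            simp at htl ⊢
            omega
          simp only [pvAfterA]
          rw [hrun, hdw']
          rw [pvLoopA_I]
          rw [show ((pre.length : Int) + ((k + 1 : Nat) : Int)) :: pvDesc (pre.length : Int) (k + 1)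
              = pvDesc (pre.length : Int) (k + 2) from rfl]
          rw [pvFlushA_desc (k + 2) pre tl _ (by simp at htl; omega)]
          rw [show (pre ++ (pvAsc c (k + 2)).reverse ++ tl.drop (k + 2),
                c + ((k + 2 : Nat) : Int)).1
              = pre₂ ++ tl.drop (k + 2) by simp [hpre₂, List.append_assoc]]
          rw [show (pre ++ (pvAsc c (k + 2)).reverse ++ tl.drop (k + 2),
                c + ((k + 2 : Nat) : Int)).2
              = (pre₂.length : Int) + 1 by rw [hc]; simp [hlen₂]; ring]
          rw [show (pre.length : Int) + ((k + 1 : Nat) : Int) + 1 = (pre₂.length : Int) by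
            rw [hlen₂]; push_cast; ring]
          rw [show ((pre.length + (ch :: rest).length : Nat) : Int)
              = ((pre₂.length + rest''.length : Nat) : Int) by rw [hlen₂]; simp [hrk]; omega]
          have hIH := IH rest'' pre₂ (tl.drop (k + 2)) (by
            have hN' := hN; simp only [List.length_cons] at hN'; omega) htl₂
          unfold pvAfterA at hIH
          rw [hIH]
          -- and now reduce the B side to the same state
          rw [pvLoopB_D ch rest pre.length _ hch, ← htw, ← hk, hrest, hdw', pvLoopB_I]
          rw [show (ch :: rest).length + 1 = (k + 2) + (rest''.length + 1) by
            simp only [List.length_cons, hrk]; omega]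
          rw [pvAsc_append (k + 2) (rest''.length + 1) c]
          simp only [pvRevSlice]
          rw [List.take_left' rfl, List.drop_left' rfl]
          rw [show pre.length + k + 1 + 1 - pre.length = k + 2 by omega]
          rw [List.take_left' (by rw [pvAsc_length])]
          rw [show pre.length + k + 1 + 1 = pre.length + (k + 2) by omega, pvDropAppend]
          rw [List.drop_left' (by rw [pvAsc_length])]
          rw [← hlen₂]
          rw [show c + ((k + 2 : Nat) : Int) = (pre₂.length : Int) + 1 by
            rw [hc, hlen₂]; push_cast; ring]

-- ===== VERDICT (by name: the statement is the Claim_ definition above) =====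
theorem arrange_guest_arrival_order_spec : Claim_equal_arrange_guest_arrival_order := by
  intro s _
  unfold Spec_arrange_guest_arrival_order
  simp only [arrange_guest_arrival_order, arrange_guest_arrival_order_alt]
  rw [show ((s.toList.length : Int) + 2) = 1 + ((s.toList.length + 1 : Nat) : Int) by
    push_cast; ring]
  rw [pvRange_map (s.toList.length + 1) 1]
  have hm := pvMain s.toList.length s.toList [] (List.replicate (s.toList.length + 1) "")
    le_rfl (by simp)
  unfold pvAfterA at hm
  simpa using hm
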